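-- pv_equiv track=rewrite | github.com/stellyes/password-analytics | run.py | remove_rotational_and_reverse_duplicates
-- ===== SOURCE A (Python) =====
-- def remove_rotational_and_reverse_duplicates(passwords):
--     """Remove passwords that are rotations or reversals of each other."""
--     unique_passwords = []
--     seen = set()  # Set to store patterns (including reversed versions)
--
--     for password in passwords:
--         # Convert the password to a tuple (to make it hashable)
--         rotation_tuple = tuple(password)
--         reverse_tuple = tuple(reversed(password))  # Reverse of the current password
--
--         # Check if the reversed password has already been seen
--         if reverse_tuple not in seen:
--             # Add the current password's tuple and its reverse to the set
--             unique_passwords.append(password)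
--             seen.add(rotation_tuple)  # Add the original pattern
--             seen.add(reverse_tuple)   # Add the reversed pattern
--
--     return unique_passwords
-- ===== SOURCE B (Python) =====
-- def remove_rotational_and_reverse_duplicates(passwords):
--     """Remove passwords that are rotations or reversals of each other."""
--     # Pass 1: record the index of the first occurrence of each canonical key
--     # (a password and its reversal share the same key min(p, p[::-1])).
--     first_at = {}
--     for i, password in enumerate(passwords):
--         key = min(password, password[::-1])
--         if key not in first_at:
--             first_at[key] = i
--     # Pass 2: keep exactly the passwords standing at a first-occurrence index.
--     return [p for i, p in enumerate(passwords)
--             if first_at.get(min(p, p[::-1])) == i]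
-- ===== Notes on version B (the rewrite author's own statement) =====
-- stated objective: alternative
-- what changed: B replaces A's online scan (appending to the result while maintaining a set of both directional tuples) by two staged passes: a dict mapping each canonical key min(p, p[::-1]) to its first-occurrence index, then a comprehension keeping exactly the passwords standing at a first-occurrence index
import Mathlib
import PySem

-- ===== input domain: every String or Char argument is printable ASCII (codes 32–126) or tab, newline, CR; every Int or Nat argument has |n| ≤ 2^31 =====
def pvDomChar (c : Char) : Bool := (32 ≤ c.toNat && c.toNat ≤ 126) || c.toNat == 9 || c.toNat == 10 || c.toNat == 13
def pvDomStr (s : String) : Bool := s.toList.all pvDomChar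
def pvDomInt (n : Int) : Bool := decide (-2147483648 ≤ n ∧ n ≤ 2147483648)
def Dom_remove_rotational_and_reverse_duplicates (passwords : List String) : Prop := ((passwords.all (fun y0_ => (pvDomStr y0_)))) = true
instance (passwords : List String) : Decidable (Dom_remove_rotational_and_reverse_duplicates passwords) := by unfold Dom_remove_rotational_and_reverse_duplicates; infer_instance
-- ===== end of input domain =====

-- B replaces A's online scan (result list appended while a set of both directional tuples is
-- maintained) by two staged passes: a dict mapping each canonical key min(p, p[::-1]) to its
-- first-occurrence index, then a comprehension keeping the passwords at those indices;
-- objective: alternative (same asymptotic cost, different decomposition).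

-- ===== PORT A =====
-- for-loop of A as structural recursion over the password list, carrying (unique_passwords, seen)
def pvALoop (ps : List String) (unique : List String) (seen : PySem.Set (List Char)) : List String :=
  match ps with
  | [] => unique
  | password :: rest =>
    let rotation_tuple := password.toList                 -- tuple(password)
    let reverse_tuple := password.toList.reverse          -- tuple(reversed(password))
    if reverse_tuple ∈ seen then
      pvALoop rest unique seen
    else
      pvALoop rest (unique ++ [password])
        (PySem.Set.add (PySem.Set.add seen rotation_tuple) reverse_tuple)

def remove_rotational_and_reverse_duplicates (passwords : List String) : List String :=
  pvALoop passwords [] PySem.Set.empty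

-- ===== PORT B =====
-- password[::-1]: reversal of the string (exact: Python string reversal is char-list reversal)
def pvStrRev (p : String) : String := String.ofList p.toList.reverse

-- min(password, password[::-1]): Python min returns the first argument when equal or smaller;
-- Lean's String ≤ is the same lexicographic code-point order as Python's
def pvCanon (p : String) : String := if p ≤ pvStrRev p then p else pvStrRev p

-- pass 1: for i, password in enumerate(passwords): if key not in first_at: first_at[key] = i
def pvFirstAtLoop (items : List (Int × String)) (first_at : PySem.Dict String Int) :
    PySem.Dict String Int :=
  match items with
  | [] => first_at
  | (i, password) :: rest =>
    let key := pvCanon password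
    pvFirstAtLoop rest (if first_at.contains key then first_at else first_at.insert key i)

-- pass 2: [p for i, p in enumerate(passwords) if first_at.get(min(p, p[::-1])) == i]
def remove_rotational_and_reverse_duplicates_alt (passwords : List String) : List String :=
  let first_at := pvFirstAtLoop (PySem.List.enumerate passwords) PySem.Dict.empty
  ((PySem.List.enumerate passwords).filter
      (fun ip => first_at.get? (pvCanon ip.2) == some ip.1)).map Prod.snd

-- ===== PRECONDITION & SPEC =====
def Spec_remove_rotational_and_reverse_duplicates (passwords : List String) (out : List String) : Prop := out = remove_rotational_and_reverse_duplicates_alt passwords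
instance (passwords : List String) (out : List String) : Decidable (Spec_remove_rotational_and_reverse_duplicates passwords out) := by unfold Spec_remove_rotational_and_reverse_duplicates; infer_instance

-- ===== CLAIM (what is proved, stated in full; the proofs are below) =====
def Claim_equal_remove_rotational_and_reverse_duplicates : Prop := ∀ (passwords : List String), Dom_remove_rotational_and_reverse_duplicates passwords → Spec_remove_rotational_and_reverse_duplicates passwords (remove_rotational_and_reverse_duplicates passwords)

-- ===== LEMMAS AND PROOFS =====

-- common reference point: online dedup of the canonical keys, with the seen keys as a list
def pvSpec (ps : List String) (seen : List String) : List String :=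
  match ps with
  | [] => []
  | p :: rest =>
    if pvCanon p ∈ seen then pvSpec rest seen
    else p :: pvSpec rest (pvCanon p :: seen)

theorem pvStrRev_toList (p : String) : (pvStrRev p).toList = p.toList.reverse := by
  simp [pvStrRev]

theorem pvStrRev_strRev (p : String) : pvStrRev (pvStrRev p) = p := by
  simp [pvStrRev]

theorem pv_toList_inj {x y : String} (h : x.toList = y.toList) : x = y := by
  have := congrArg String.ofList h
  simpa using this

theorem pv_rev_eq_iff (x y : String) : x.toList.reverse = y.toList ↔ x = pvStrRev y := by
  constructor
  · intro h
    apply pv_toList_inj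
    rw [pvStrRev_toList, ← h, List.reverse_reverse]
  · intro h
    subst h
    rw [pvStrRev_toList, List.reverse_reverse]

theorem pv_revrev_eq_iff (x y : String) : x.toList.reverse = y.toList.reverse ↔ x = y := by
  constructor
  · intro h
    exact pv_toList_inj (by simpa using congrArg List.reverse h)
  · intro h; rw [h]

-- the canonical key identifies exactly the unordered pair {p, reverse p}
theorem pvCanon_eq_iff (x y : String) : pvCanon x = pvCanon y ↔ (x = y ∨ x = pvStrRev y) := by
  constructor
  · intro h
    unfold pvCanon at h
    split_ifs at h with h1 h2 h2
    · exact Or.inl h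
    · exact Or.inr h
    · exact Or.inr (by rw [← h, pvStrRev_strRev])
    · exact Or.inl (by rw [← pvStrRev_strRev x, h, pvStrRev_strRev])
  · intro h
    rcases h with h | h
    · rw [h]
    · subst h
      unfold pvCanon
      rw [pvStrRev_strRev]
      split_ifs with h1 h2 h2
      · exact le_antisymm h1 h2
      · rfl
      · rfl
      · exact absurd (le_of_not_ge h1) h2

-- A's loop computes pvSpec, given that the directional set answers like the canonical-key list
theorem pvALoop_spec (ps : List String) (unique : List String)
    (seenA : PySem.Set (List Char)) (seenL : List String)
    (h : ∀ x : String, x.toList.reverse ∈ seenA ↔ pvCanon x ∈ seenL) :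
    pvALoop ps unique seenA = unique ++ pvSpec ps seenL := by
  induction ps generalizing unique seenA seenL with
  | nil => simp [pvALoop, pvSpec]
  | cons p rest ih =>
    rw [pvALoop, pvSpec]
    by_cases hm : p.toList.reverse ∈ seenA
    · rw [if_pos hm, if_pos ((h p).mp hm)]
      exact ih unique seenA seenL h
    · rw [if_neg hm, if_neg (fun hb => hm ((h p).mpr hb))]
      rw [ih (unique ++ [p]) _ (pvCanon p :: seenL) ?_, List.append_assoc]
      · rfl
      intro x
      rw [PySem.Set.mem_add, PySem.Set.mem_add, List.mem_cons]
      constructor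
      · rintro ((hx | hx) | hx)
        · exact Or.inr ((h x).mp hx)
        · exact Or.inl ((pvCanon_eq_iff x p).mpr (Or.inr ((pv_rev_eq_iff x p).mp hx)))
        · exact Or.inl ((pvCanon_eq_iff x p).mpr (Or.inl ((pv_revrev_eq_iff x p).mp hx)))
      · rintro (hx | hx)
        · rcases (pvCanon_eq_iff x p).mp hx with hx | hx
          · exact Or.inr ((pv_revrev_eq_iff x p).mpr hx)
          · exact Or.inl (Or.inr ((pv_rev_eq_iff x p).mpr hx))
        · exact Or.inl (Or.inl ((h x).mpr hx))

-- pvSpec only looks at membership in seen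
theorem pvSpec_congr (ps : List String) (s1 s2 : List String)
    (h : ∀ x : String, x ∈ s1 ↔ x ∈ s2) : pvSpec ps s1 = pvSpec ps s2 := by
  induction ps generalizing s1 s2 with
  | nil => rfl
  | cons p rest ih =>
    rw [pvSpec, pvSpec]
    by_cases hm : pvCanon p ∈ s1
    · rw [if_pos hm, if_pos ((h _).mp hm)]
      exact ih s1 s2 h
    · rw [if_neg hm, if_neg (fun hb => hm ((h _).mpr hb))]
      rw [ih (pvCanon p :: s1) (pvCanon p :: s2) (by intro x; simp [h x])]

-- pass-1 loop: an already-present key is never overwritten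
theorem pvFirstAtLoop_get_of_some (items : List (Int × String))
    (d : PySem.Dict String Int) (k : String) (v : Int) (h : d.get? k = some v) :
    (pvFirstAtLoop items d).get? k = some v := by
  induction items generalizing d with
  | nil => exact h
  | cons ip rest ih =>
    obtain ⟨i, p⟩ := ip
    rw [pvFirstAtLoop]
    by_cases hc : d.contains (pvCanon p)
    · rw [if_pos hc]; exact ih d h
    · rw [if_neg hc]
      apply ih
      rw [PySem.Dict.get?_insert_of_ne]
      · exact h
      · intro hk
        rw [hk] at h
        rw [(PySem.Dict.get?_eq_none_iff_contains d (pvCanon p)).mpr (by simpa using hc)] at h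
        simp at h

-- pass-1 loop: a fresh key gets the index of its first matching item
theorem pvFirstAtLoop_get_of_none (items : List (Int × String))
    (d : PySem.Dict String Int) (k : String) (h : d.get? k = none) :
    (pvFirstAtLoop items d).get? k
      = (items.find? (fun ip => pvCanon ip.2 == k)).map Prod.fst := by
  induction items generalizing d with
  | nil => simpa [pvFirstAtLoop] using h
  | cons ip rest ih =>
    obtain ⟨i, p⟩ := ip
    rw [pvFirstAtLoop, List.find?_cons]
    by_cases hk : pvCanon p = k
    · subst hk
      have hc : d.contains (pvCanon p) = false := by
        rw [← PySem.Dict.get?_eq_none_iff_contains]; exact h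
      rw [if_neg (by simp [hc])]
      rw [pvFirstAtLoop_get_of_some rest _ _ i (PySem.Dict.get?_insert_self d _ i)]
      simp
    · have hpred : (pvCanon p == k) = false := by simpa using hk
      rw [hpred]
      by_cases hc : d.contains (pvCanon p)
      · rw [if_pos hc]; exact ih d h
      · rw [if_neg hc]
        apply ih
        rw [PySem.Dict.get?_insert_of_ne _ _ (fun he => hk he.symm)]
        exact h

-- no entry of enumerate pre 0 matches a key outside pre's canonical keys
theorem pv_find_pre_none (pre : List String) (k : String) (hk : k ∉ pre.map pvCanon) :
    (PySem.List.enumerate pre 0).find? (fun jp => pvCanon jp.2 == k) = none := by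
  rw [List.find?_eq_none]
  intro q hq
  rcases (PySem.List.mem_enumerate_iff pre 0 q).mp hq with ⟨j, hj, rfl⟩
  simp only [beq_iff_eq]
  intro hc
  exact hk (by rw [← hc]; exact List.mem_map_of_mem (pre.getElem_mem hj))

-- any entry found in enumerate pre 0 has index < pre.length
theorem pv_find_pre_lt (pre : List String) (pr : String → Bool) (q : Int × String)
    (hq : (PySem.List.enumerate pre 0).find? (fun jp => pr jp.2) = some q) :
    q.1 < (pre.length : Int) := by
  have hmem := List.mem_of_find?_eq_some hq
  rcases (PySem.List.mem_enumerate_iff pre 0 q).mp hmem with ⟨j, hj, rfl⟩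
  simp
  omega

-- pass 2 computes pvSpec: induction along the list with the processed prefix made explicit
theorem pvFilter_spec (t : List String) : ∀ (pre : List String),
    ((PySem.List.enumerate t (pre.length : Int)).filter
        (fun ip => (((PySem.List.enumerate (pre ++ t) 0).find?
            (fun jp => pvCanon jp.2 == pvCanon ip.2)).map Prod.fst) == some ip.1)).map Prod.snd
      = pvSpec t (pre.map pvCanon) := by
  induction t with
  | nil => intro pre; simp [pvSpec]
  | cons p rest ih =>
    intro pre
    rw [PySem.List.enumerate_cons, List.filter_cons, pvSpec]
    have hsplit : PySem.List.enumerate (pre ++ p :: rest) 0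
        = PySem.List.enumerate pre 0 ++ PySem.List.enumerate (p :: rest) (0 + pre.length) := by
      exact PySem.List.enumerate_append pre (p :: rest) 0
    have hassoc : pre ++ p :: rest = (pre ++ [p]) ++ rest := by simp
    by_cases hm : pvCanon p ∈ pre.map pvCanon
    · -- the key was seen before: find? hits inside pre, index < pre.length, entry dropped
      rw [if_pos hm]
      obtain ⟨x, hx⟩ : ∃ x, (PySem.List.enumerate pre 0).find?
          (fun jp => pvCanon jp.2 == pvCanon p) = some x := by
        rcases List.mem_map.mp hm with ⟨q, hq, hcq⟩
        rcases List.mem_iff_getElem.mp hq with ⟨j, hj, rfl⟩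
        have : ((PySem.List.enumerate pre 0).find?
            (fun jp => pvCanon jp.2 == pvCanon p)).isSome := by
          rw [List.find?_isSome]
          exact ⟨((j : Int), pre[j]), (PySem.List.mem_enumerate_iff pre 0 _).mpr
            ⟨j, hj, by simp⟩, by simpa using hcq⟩
        exact Option.isSome_iff_exists.mp this
      have hlt := pv_find_pre_lt pre (fun s => pvCanon s == pvCanon p) x hx
      have hcond : ((((PySem.List.enumerate (pre ++ p :: rest) 0).find?
          (fun jp => pvCanon jp.2 == pvCanon p)).map Prod.fst) == some (pre.length : Int))
          = false := by
        rw [hsplit, List.find?_append, hx, Option.some_or, Option.map_some]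
        simp only [beq_eq_false_iff_ne, ne_eq, Option.some.injEq]
        omega
      simp only [hcond, Bool.false_eq_true, if_false]
      have := ih (pre ++ [p])
      rw [hassoc]
      rw [show ((pre.length : Int) + 1) = (((pre ++ [p]).length : Int)) by simp] at *
      rw [this]
      refine pvSpec_congr rest _ _ ?_
      intro x
      simp only [List.map_append, List.map_cons, List.map_nil, List.mem_append,
        List.mem_cons, List.not_mem_nil, or_false]
      constructor
      · rintro (h | h)
        · exact h
        · subst h; exact hm
      · exact Or.inl
    · -- fresh key: find? hits the current entry itself, which is kept
      rw [if_neg hm]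
      have hcond : ((((PySem.List.enumerate (pre ++ p :: rest) 0).find?
          (fun jp => pvCanon jp.2 == pvCanon p)).map Prod.fst) == some (pre.length : Int))
          = true := by
        rw [hsplit, List.find?_append, pv_find_pre_none pre _ hm]
        rw [PySem.List.enumerate_cons, List.find?_cons]
        simp
      simp only [hcond, if_true]
      rw [List.map_cons]
      congr 1
      have := ih (pre ++ [p])
      rw [hassoc]
      rw [show ((pre.length : Int) + 1) = (((pre ++ [p]).length : Int)) by simp] at *
      rw [this]
      refine pvSpec_congr rest _ _ ?_
      intro x
      simp only [List.map_append, List.map_cons, List.map_nil, List.mem_append,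
        List.mem_cons, List.not_mem_nil, or_false]
      exact or_comm

-- ===== VERDICT (by name: the statement is the Claim_ definition above) =====
theorem remove_rotational_and_reverse_duplicates_spec : Claim_equal_remove_rotational_and_reverse_duplicates := by
  intro passwords _
  show _ = _
  unfold remove_rotational_and_reverse_duplicates remove_rotational_and_reverse_duplicates_alt
  rw [pvALoop_spec passwords [] PySem.Set.empty [] (by simp [PySem.Set.empty])]
  rw [List.nil_append]
  have hfilter :
      ((PySem.List.enumerate passwords).filter
          (fun ip => (pvFirstAtLoop (PySem.List.enumerate passwords)
              PySem.Dict.empty).get? (pvCanon ip.2) == some ip.1))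
        = ((PySem.List.enumerate passwords).filter
          (fun ip => (((PySem.List.enumerate (([] : List String) ++ passwords) 0).find?
              (fun jp => pvCanon jp.2 == pvCanon ip.2)).map Prod.fst) == some ip.1)) := by
    apply List.filter_congr
    intro ip _
    rw [pvFirstAtLoop_get_of_none _ _ _ (PySem.Dict.get?_empty _)]
    rfl
  simp only [hfilter]
  have := pvFilter_spec passwords []
  simpa using this.symm
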